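-- pv_equiv track=rewrite | github.com/mikez321/practice_projects | other_challenges/python/add67.py | add67
-- ===== SOURCE A (Python) =====
-- def add67(nums: list) -> int:
--     """
--     Add together any numbers not enclosed in 6 and 7.
--
--     :param nums: A list of ints
--     :return: The sum of all numbers not enclosed in 6 and 7.  Adding will stop
--         when the number 6 is reached, and it will not continue until after the
--         next number 7 is found.
--     :example:
--         add67[1, 2, 3]
--         >>> 6
--
--         add67[1, 2, 6, 5, 7, 3]
--         >>> 6
--     """
--     running_sum = 0
--     if 6 not in nums:
--         return sum(nums)
--     else:
--         omit = False
--         for num in nums: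
--             if omit is False and num != 6:
--                 running_sum += num
--             elif omit is False and num == 6:
--                 omit = True
--                 continue
--             elif omit is True and num == 7:
--                 omit = False
--                 continue
--
--     return running_sum
-- ===== SOURCE B (Python) =====
-- def add67(nums: list) -> int:
--     total = 0
--     rest = nums
--     while 6 in rest:
--         i = rest.index(6)
--         total += sum(rest[:i])
--         rest = rest[i + 1:]
--         if 7 in rest:
--             rest = rest[rest.index(7) + 1:]
--         else:
--             rest = []
--     return total + sum(rest)
-- ===== Notes on version B (the rewrite author's own statement) =====
-- stated objective: alternative
-- what changed: Replaced the element-by-element boolean state machine by staged list operations: repeatedly locate the next 6 with index(), sum the slice before it in one call, and slice past the matching 7, so no per-element omit flag exists.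
import Mathlib
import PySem

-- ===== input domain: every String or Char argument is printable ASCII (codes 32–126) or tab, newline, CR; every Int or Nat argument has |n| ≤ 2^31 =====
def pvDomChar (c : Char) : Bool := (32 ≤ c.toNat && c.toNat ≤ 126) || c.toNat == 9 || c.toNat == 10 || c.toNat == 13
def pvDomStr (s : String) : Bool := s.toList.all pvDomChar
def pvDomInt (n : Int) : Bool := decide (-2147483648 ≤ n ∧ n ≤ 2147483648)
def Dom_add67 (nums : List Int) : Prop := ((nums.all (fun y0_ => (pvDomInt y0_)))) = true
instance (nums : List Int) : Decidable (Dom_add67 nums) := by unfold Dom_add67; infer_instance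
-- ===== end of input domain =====

-- B replaces A's per-element boolean omit state machine by staged list operations:
-- find the next 6 with index, sum the slice before it, slice past the matching 7 (objective: alternative).


-- ===== PORT A =====
-- A's loop body: state (running_sum, omit), branches in A's order
def add67Step (st : Int × Bool) (num : Int) : Int × Bool :=
  if st.2 = false ∧ num ≠ 6 then (st.1 + num, st.2)
  else if st.2 = false ∧ num = 6 then (st.1, true)
  else if st.2 = true ∧ num = 7 then (st.1, false)
  else st

def add67 (nums : List Int) : Int :=
  if ¬ ((6 : Int) ∈ nums) then nums.sum
  else (nums.foldl add67Step (0, false)).1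

-- ===== PORT B =====
-- 'if 7 in rest: rest = rest[rest.index(7)+1:] else: rest = []'
def dropPast7 (xs : List Int) : List Int :=
  if (7 : Int) ∈ xs then xs.drop (xs.idxOf 7 + 1) else []

-- the 'while 6 in rest' loop, recursing on the remaining suffix
def add67go (rest : List Int) : Int :=
  if h : (6 : Int) ∈ rest then
    let i := rest.idxOf 6
    (rest.take i).sum + add67go (dropPast7 (rest.drop (i + 1)))
  else rest.sum
termination_by rest.length
decreasing_by
  have h1 : rest.idxOf 6 < rest.length := List.idxOf_lt_length_of_mem h
  unfold dropPast7
  split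
  · simp only [List.length_drop]; omega
  · simp only [List.length_nil]; omega

def add67_alt (nums : List Int) : Int := add67go nums

-- ===== PRECONDITION & SPEC =====
def Spec_add67 (nums : List Int) (out : Int) : Prop := out = add67_alt nums
instance (nums : List Int) (out : Int) : Decidable (Spec_add67 nums out) := by unfold Spec_add67; infer_instance

-- ===== CLAIM (what is proved, stated in full; the proofs are below) =====
def Claim_equal_add67 : Prop := ∀ (nums : List Int), Dom_add67 nums → Spec_add67 nums (add67 nums)

-- ===== LEMMAS AND PROOFS =====
theorem foldl_no6 (xs : List Int) (h : (6 : Int) ∉ xs) (s : Int) :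
    List.foldl add67Step (s, false) xs = (s + xs.sum, false) := by
  induction xs generalizing s with
  | nil => simp
  | cons x xs ih =>
    simp only [List.mem_cons, not_or] at h
    have hx : x ≠ 6 := fun hx => h.1 hx.symm
    simp only [List.foldl_cons, add67Step]
    simp [hx, ih h.2]
    ring

theorem foldl_omit (ys : List Int) (s : Int) :
    (List.foldl add67Step (s, true) ys).1
      = (List.foldl add67Step (s, false) (dropPast7 ys)).1 := by
  induction ys generalizing s with
  | nil => simp [dropPast7]
  | cons y ys ih =>
    by_cases hy : y = 7
    · subst hy
      simp only [List.foldl_cons, add67Step]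
      simp [dropPast7]
    · simp only [List.foldl_cons]
      have hstep : add67Step (s, true) y = (s, true) := by simp [add67Step, hy]
      rw [hstep, ih]
      congr 1
      unfold dropPast7
      by_cases h7 : (7 : Int) ∈ ys
      · have : (7 : Int) ∈ y :: ys := List.mem_cons_of_mem _ h7
        simp [h7, this, List.idxOf_cons_ne _ hy, Nat.succ_eq_add_one, List.drop_succ_cons]
      · have : (7 : Int) ∉ y :: ys := by simp [h7]; exact fun hh => absurd hh.symm hy
        simp [h7, this]

theorem not_mem_take_idxOf (xs : List Int) (a : Int) : a ∉ xs.take (xs.idxOf a) := by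
  induction xs with
  | nil => simp
  | cons x xs ih =>
    by_cases hx : x = a
    · simp [hx, List.idxOf_cons_self]
    · rw [List.idxOf_cons_ne _ hx]
      simp only [Nat.succ_eq_add_one, List.take_succ_cons, List.mem_cons, not_or]
      exact ⟨fun h => hx h.symm, ih⟩

theorem go_no6 (xs : List Int) (h : (6 : Int) ∉ xs) : add67go xs = xs.sum := by
  rw [add67go]; simp [h]

theorem foldl_eq_go (xs : List Int) (s : Int) :
    (List.foldl add67Step (s, false) xs).1 = s + add67go xs := by
  by_cases h : (6 : Int) ∈ xs
  · have hi : xs.idxOf 6 < xs.length := List.idxOf_lt_length_of_mem h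
    have hdecomp : xs = xs.take (xs.idxOf 6) ++ 6 :: xs.drop (xs.idxOf 6 + 1) := by
      conv_lhs => rw [← List.take_append_drop (xs.idxOf 6) xs]
      congr 1
      rw [List.drop_eq_getElem_cons hi]
      simp [List.getElem_idxOf]
    conv_lhs => rw [hdecomp]
    rw [List.foldl_append, foldl_no6 _ (not_mem_take_idxOf xs 6)]
    have hstep : add67Step (s + (xs.take (xs.idxOf 6)).sum, false) 6
        = (s + (xs.take (xs.idxOf 6)).sum, true) := by simp [add67Step]
    rw [List.foldl_cons, hstep, foldl_omit]
    have hlt : (dropPast7 (xs.drop (xs.idxOf 6 + 1))).length < xs.length := by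
      unfold dropPast7
      split
      · simp only [List.length_drop]; omega
      · simp only [List.length_nil]; omega
    rw [foldl_eq_go]
    conv_rhs => rw [add67go]
    simp [h, add_assoc]
  · rw [foldl_no6 xs h, go_no6 xs h]
termination_by xs.length
decreasing_by exact hlt

-- ===== VERDICT (by name: the statement is the Claim_ definition above) =====
theorem add67_spec : Claim_equal_add67 := by
  intro nums _
  unfold Spec_add67 add67 add67_alt
  by_cases h : (6 : Int) ∈ nums
  · simp only [h, not_true_eq_false, if_false]
    have := foldl_eq_go nums 0
    omega
  · simp only [h, not_false_eq_true, if_pos]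
    rw [go_no6 nums h]
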